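-- pv_equiv track=rewrite | github.com/a-urbanek/superhirn_22 | python/logic/general_logic.py | calculate_pins
-- ===== SOURCE A (Python) =====
-- def calculate_pins(solution, guess):
--     """
--     Berechnet die Anzahl der schwarzen und weißen Pins für einen gegebenen Rateversuch im Vergleich zur Lösung.
--
--     Args:
--         solution (list): Die Lösung, repräsentiert als Liste von Farben.
--         guess (list): Der Rateversuch, repräsentiert als Liste von Farben.
--
--     Returns:
--         tuple: Ein Tupel, bestehend aus der Anzahl der schwarzen und weißen Pins.
--
--     """
--     # Variable zur Zählung der schwarzen Pins initialisieren
--     black_pins = 0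
--
--     # Variable zur Zählung der weißen Pins initialisieren
--     white_pins = 0
--
--     # Erstellen von Kopien der Lösung und des Rateversuchs, um sie zu modifizieren
--     solution_copy = solution.copy()
--     guess_copy = guess.copy()
--
--     # Berechnung der schwarzen Pins
--     for i in range(len(guess)):
--         # Wenn die Farbe in der gleichen Position in Lösung und Rateversuch übereinstimmt
--         if guess[i] == solution[i]:
--             # Inkrementiere die Anzahl der schwarzen Pins
--             black_pins += 1
--
--             # Markiere die Übereinstimmungen, um sie bei der Berechnung der weißen Pins zu ignorieren
--             solution_copy[i] = None
--             guess_copy[i] = None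
--
--     # Berechnung der weißen Pins
--     for i in range(len(guess)):
--         # Wenn die Farbe im Rateversuch an einer anderen Position in der Lösung vorkommt
--         if guess_copy[i] is not None and guess_copy[i] in solution_copy:
--             # Inkrementiere die Anzahl der weißen Pins
--             white_pins += 1
--
--             # Markiere die Übereinstimmungen, um Doppelzählungen zu vermeiden
--             solution_copy[solution_copy.index(guess_copy[i])] = None
--             guess_copy[i] = None
--
--     # Rückgabe der Anzahl der schwarzen und weißen Pins
--     return black_pins, white_pins
-- ===== SOURCE B (Python) =====
-- def calculate_pins(solution, guess):
--     # One pass over the paired positions, then color counts: white = sum of min counts per color.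
--     black = 0
--     rem_s = {}
--     rem_g = {}
--     for s, g in zip(solution, guess):
--         if s == g:
--             black += 1
--         else:
--             rem_s[s] = rem_s.get(s, 0) + 1
--             rem_g[g] = rem_g.get(g, 0) + 1
--     for s in solution[len(guess):]:
--         rem_s[s] = rem_s.get(s, 0) + 1
--     white = sum(min(c, rem_s.get(g, 0)) for g, c in rem_g.items())
--     return black, white
-- ===== Notes on version B (the rewrite author's own statement) =====
-- stated objective: faster
-- what changed: A's white-pin computation scans solution_copy with 'in' and '.index' inside a loop (quadratic); B makes one pass over zip(solution, guess) building per-color count dicts of the unmatched pegs and returns white = sum over colors of min(count in remaining guess, count in remaining solution).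
import Mathlib
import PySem

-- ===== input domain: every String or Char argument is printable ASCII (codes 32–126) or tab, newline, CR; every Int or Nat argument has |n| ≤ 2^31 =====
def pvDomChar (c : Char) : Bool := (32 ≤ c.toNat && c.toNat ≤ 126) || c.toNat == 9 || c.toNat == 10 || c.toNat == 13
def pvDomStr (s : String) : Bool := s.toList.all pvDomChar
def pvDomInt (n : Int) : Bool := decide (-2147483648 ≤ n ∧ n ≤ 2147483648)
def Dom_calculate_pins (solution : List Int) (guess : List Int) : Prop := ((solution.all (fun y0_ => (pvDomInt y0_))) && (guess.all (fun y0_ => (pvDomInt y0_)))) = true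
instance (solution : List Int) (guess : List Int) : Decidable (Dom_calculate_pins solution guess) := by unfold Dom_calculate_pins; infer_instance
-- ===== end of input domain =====

-- B replaces A's quadratic scan/index/mark white-pin loop by color counters: white = sum over colors of
-- min(remaining count in solution, remaining count in guess). Python returns a pair; it is ported as [black, white].

-- ===== PORT A =====
-- body of A's first loop ('for i in range(len(guess)): if guess[i] == solution[i]: ...')
def pinsStep1 (solution guess : List Int)
    (st : Int × List (Option Int) × List (Option Int)) (i : Int) :
    Int × List (Option Int) × List (Option Int) :=
  match PySem.List.pyGet? guess i, PySem.List.pyGet? solution i with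
  | some g, some s =>
    if g = s then (st.1 + 1, st.2.1.set i.toNat none, st.2.2.set i.toNat none)
    else st
  | _, _ => st  -- Python raises IndexError here; excluded by Pre_

-- body of A's second loop ('if guess_copy[i] is not None and guess_copy[i] in solution_copy: ...')
def pinsStep2 (st : Int × List (Option Int) × List (Option Int)) (i : Int) :
    Int × List (Option Int) × List (Option Int) :=
  match PySem.List.pyGet? st.2.2 i with
  | some (some g) =>
    if some g ∈ st.2.1 then
      match PySem.List.index? st.2.1 (some g) with
      | some j => (st.1 + 1, st.2.1.set j none, st.2.2.set i.toNat none)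
      | none => st  -- unreachable: membership just checked
    else st
  | _ => st

def calculate_pins (solution : List Int) (guess : List Int) : List Int :=
  let st1 := (PySem.List.pyRange 0 (guess.length : Int) 1).foldl (pinsStep1 solution guess)
    (0, solution.map some, guess.map some)
  let st2 := (PySem.List.pyRange 0 (guess.length : Int) 1).foldl pinsStep2 (0, st1.2.1, st1.2.2)
  [st1.1, st2.1]

-- ===== PORT B =====
-- body of B's single pass over zip(solution, guess)
def altStep (st : Int × PySem.Dict Int Int × PySem.Dict Int Int) (p : Int × Int) :
    Int × PySem.Dict Int Int × PySem.Dict Int Int :=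
  if p.1 = p.2 then (st.1 + 1, st.2.1, st.2.2)
  else (st.1, st.2.1.insert p.1 (st.2.1.getD p.1 0 + 1),
        st.2.2.insert p.2 (st.2.2.getD p.2 0 + 1))

-- 'd[s] = d.get(s, 0) + 1'
def insStep (d : PySem.Dict Int Int) (s : Int) : PySem.Dict Int Int :=
  d.insert s (d.getD s 0 + 1)

def calculate_pins_alt (solution : List Int) (guess : List Int) : List Int :=
  let st := (solution.zip guess).foldl altStep (0, PySem.Dict.empty, PySem.Dict.empty)
  let rem_s := (PySem.List.slice solution (some (guess.length : Int)) none).foldl insStep st.2.1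
  let white := (st.2.2.items.map (fun p => min p.2 (rem_s.getD p.1 0))).sum
  [st.1, white]

-- ===== PRECONDITION & SPEC =====
-- Pre_ excludes exactly the inputs where guess is longer than solution: there A's read solution[i] raises IndexError.
def Pre_calculate_pins (solution : List Int) (guess : List Int) : Prop :=
  guess.length ≤ solution.length
instance (solution : List Int) (guess : List Int) : Decidable (Pre_calculate_pins solution guess) := by
  unfold Pre_calculate_pins; infer_instance

def pvWitness_calculate_pins : List Int × List Int := ([1, 2, 3], [2, 2])

def Spec_calculate_pins (solution : List Int) (guess : List Int) (out : List Int) : Prop :=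
  out = calculate_pins_alt solution guess
instance (solution : List Int) (guess : List Int) (out : List Int) : Decidable (Spec_calculate_pins solution guess out) := by
  unfold Spec_calculate_pins; infer_instance

-- ===== CLAIM (what is proved, stated in full; the proofs are below) =====
def Claim_equal_calculate_pins : Prop := ∀ (solution : List Int) (guess : List Int), Dom_calculate_pins solution guess → Pre_calculate_pins solution guess → Spec_calculate_pins solution guess (calculate_pins solution guess)

-- ===== LEMMAS AND PROOFS =====

-- the state of A's copies after the first k positions of the black-pin loop have been processed
def maskF (sol gu : List Int) (k : Nat) : List (Option Int) :=
  (((sol.zip gu).take k).map fun p => if p.1 = p.2 then none else some p.1) ++ (sol.drop k).map some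
def maskG (sol gu : List Int) (k : Nat) : List (Option Int) :=
  (((sol.zip gu).take k).map fun p => if p.1 = p.2 then none else some p.2) ++ (gu.drop k).map some

-- A's white-pin loop as a structural recursion over the remaining guess copies
def greedy : List (Option Int) → List (Option Int) → Int
  | [], _ => 0
  | (none :: rest), sc => greedy rest sc
  | (some g :: rest), sc =>
    if some g ∈ sc then
      match PySem.List.index? sc (some g) with
      | some j => 1 + greedy rest (sc.set j none)
      | none => greedy rest sc
    else greedy rest sc

lemma maskF_zero (sol gu : List Int) : maskF sol gu 0 = sol.map some := by
  simp [maskF]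

lemma maskG_zero (sol gu : List Int) : maskG sol gu 0 = gu.map some := by
  simp [maskG]

lemma maskF_succ (sol gu : List Int) (k : Nat) (hk : k < gu.length) (hle : gu.length ≤ sol.length) :
    maskF sol gu (k + 1) =
      if sol[k]'(lt_of_lt_of_le hk hle) = gu[k]'hk then (maskF sol gu k).set k none
      else maskF sol gu k := by
  have hks : k < sol.length := lt_of_lt_of_le hk hle
  have hz : k < (sol.zip gu).length := by rw [List.length_zip]; omega
  have hget : (sol.zip gu)[k]? = some (sol[k], gu[k]) := by
    rw [List.getElem?_eq_getElem hz, List.getElem_zip]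
  have hdrop : sol.drop k = sol[k] :: sol.drop (k + 1) := List.drop_eq_getElem_cons hks
  have hdropm : List.drop k (List.map some sol) = some sol[k] :: List.drop (k + 1) (List.map some sol) :=
    calc List.drop k (List.map some sol) = List.map some (List.drop k sol) := by simp
    _ = _ := by rw [hdrop, List.map_cons]; simp
  have hlen : ((((sol.zip gu).take k).map fun p => if p.1 = p.2 then none else some p.1)).length = k := by
    simp [List.length_take]; omega
  have hmin : min k (min sol.length gu.length) = k := by omega
  unfold maskF
  rw [List.take_succ, hget]
  split_ifs with h
  · simp [h, hdropm, hlen, hmin, List.set_append]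
  · simp [h, hdropm]

lemma maskG_succ (sol gu : List Int) (k : Nat) (hk : k < gu.length) (hle : gu.length ≤ sol.length) :
    maskG sol gu (k + 1) =
      if sol[k]'(lt_of_lt_of_le hk hle) = gu[k]'hk then (maskG sol gu k).set k none
      else maskG sol gu k := by
  have hz : k < (sol.zip gu).length := by rw [List.length_zip]; omega
  have hget : (sol.zip gu)[k]? = some (sol[k], gu[k]) := by
    rw [List.getElem?_eq_getElem hz, List.getElem_zip]
  have hdrop : gu.drop k = gu[k] :: gu.drop (k + 1) := List.drop_eq_getElem_cons hk
  have hdropm : List.drop k (List.map some gu) = some gu[k] :: List.drop (k + 1) (List.map some gu) :=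
    calc List.drop k (List.map some gu) = List.map some (List.drop k gu) := by simp
    _ = _ := by rw [hdrop, List.map_cons]; simp
  have hlen : ((((sol.zip gu).take k).map fun p => if p.1 = p.2 then none else some p.2)).length = k := by
    simp [List.length_take]; omega
  have hmin : min k (min sol.length gu.length) = k := by omega
  unfold maskG
  rw [List.take_succ, hget]
  split_ifs with h
  · simp [h, hdropm, hlen, hmin, List.set_append]
  · simp [h, hdropm]

lemma foldl_pinsStep1 (sol gu : List Int) (hle : gu.length ≤ sol.length) :
    ∀ (m k : Nat), k + m = gu.length → ∀ (b : Int),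
    (PySem.List.pyRange (k : Int) (gu.length : Int) 1).foldl (pinsStep1 sol gu)
        (b, maskF sol gu k, maskG sol gu k)
      = (b + (((sol.zip gu).drop k).countP (fun p => decide (p.1 = p.2)) : Int),
         maskF sol gu gu.length, maskG sol gu gu.length) := by
  intro m
  induction m with
  | zero =>
    intro k hkm b
    have hk : k = gu.length := by omega
    subst hk
    have hzlen : (sol.zip gu).length = gu.length := by rw [List.length_zip]; omega
    rw [show PySem.List.pyRange ((gu.length : Nat) : Int) ((gu.length : Nat) : Int) 1 = [] from by
      simp [pysem]]
    simp [List.drop_eq_nil_of_le (le_of_eq hzlen)]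
  | succ m ih =>
    intro k hkm b
    have hk : k < gu.length := by omega
    have hks : k < sol.length := lt_of_lt_of_le hk hle
    have hz : k < (sol.zip gu).length := by rw [List.length_zip]; omega
    have hlt : ((k : Nat) : Int) < ((gu.length : Nat) : Int) := by exact_mod_cast hk
    rw [PySem.List.pyRange_one_cons hlt, List.foldl_cons]
    have hg : PySem.List.pyGet? gu ((k : Nat) : Int) = some gu[k] := by
      rw [PySem.List.pyGet?_natCast, List.getElem?_eq_getElem hk]
    have hs : PySem.List.pyGet? sol ((k : Nat) : Int) = some sol[k] := by
      rw [PySem.List.pyGet?_natCast, List.getElem?_eq_getElem hks]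
    have hzdrop : (sol.zip gu).drop k = (sol[k], gu[k]) :: (sol.zip gu).drop (k + 1) := by
      rw [List.drop_eq_getElem_cons hz, List.getElem_zip]
    have hcast : ((k : Nat) : Int) + 1 = (((k + 1 : Nat)) : Int) := by push_cast; ring
    by_cases h : sol[k] = gu[k]
    · have hstep : pinsStep1 sol gu (b, maskF sol gu k, maskG sol gu k) ((k : Nat) : Int)
          = (b + 1, (maskF sol gu k).set k none, (maskG sol gu k).set k none) := by
        simp [pinsStep1, hg, hs, h.symm]
      have hF : (maskF sol gu k).set k none = maskF sol gu (k + 1) := by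
        rw [maskF_succ sol gu k hk hle, if_pos h]
      have hG : (maskG sol gu k).set k none = maskG sol gu (k + 1) := by
        rw [maskG_succ sol gu k hk hle, if_pos h]
      have harith : b + ((((sol.zip gu).drop k).countP (fun p => decide (p.1 = p.2)) : Nat) : Int)
          = (b + 1) + ((((sol.zip gu).drop (k + 1)).countP (fun p => decide (p.1 = p.2)) : Nat) : Int) := by
        rw [hzdrop, List.countP_cons_of_pos (by simpa using h)]
        push_cast; ring
      rw [hstep, hF, hG, hcast, ih (k + 1) (by omega) (b + 1), harith]
    · have h' : ¬ (gu[k] = sol[k]) := fun hgs => h (Eq.symm hgs)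
      have hstep : pinsStep1 sol gu (b, maskF sol gu k, maskG sol gu k) ((k : Nat) : Int)
          = (b, maskF sol gu k, maskG sol gu k) := by
        simp [pinsStep1, hg, hs, h']
      rw [hstep, show maskF sol gu k = maskF sol gu (k + 1) from by
            rw [maskF_succ sol gu k hk hle, if_neg h],
          show maskG sol gu k = maskG sol gu (k + 1) from by
            rw [maskG_succ sol gu k hk hle, if_neg h],
          hcast, ih (k + 1) (by omega) b,
          show ((((sol.zip gu).drop k).countP (fun p => decide (p.1 = p.2)) : Nat) : Int)
            = ((((sol.zip gu).drop (k + 1)).countP (fun p => decide (p.1 = p.2)) : Nat) : Int) from by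
              rw [hzdrop, List.countP_cons_of_neg (by simpa using h)]]


lemma foldl_pinsStep2 :
    ∀ (post pre sc : List (Option Int)) (w : Int),
    ((PySem.List.pyRange (pre.length : Int) (((pre ++ post).length : Nat) : Int) 1).foldl
        pinsStep2 (w, sc, pre ++ post)).1 = w + greedy post sc := by
  intro post
  induction post with
  | nil =>
    intro pre sc w
    rw [show ((pre ++ ([] : List (Option Int))).length : Int) = ((pre.length : Nat) : Int) from by simp]
    rw [show PySem.List.pyRange ((pre.length : Nat) : Int) ((pre.length : Nat) : Int) 1 = [] from by
      simp [pysem]]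
    simp [greedy]
  | cons v rest ih =>
    intro pre sc w
    have hlt : ((pre.length : Nat) : Int) < (((pre ++ v :: rest).length : Nat) : Int) := by
      simp only [List.length_append, List.length_cons]
      push_cast; omega
    rw [PySem.List.pyRange_one_cons hlt, List.foldl_cons]
    have hread : PySem.List.pyGet? (pre ++ v :: rest) ((pre.length : Nat) : Int) = some v := by
      rw [PySem.List.pyGet?_natCast]
      simp
    have hlen2 : ∀ (x : Option Int), ((pre ++ v :: rest).length : Int) = (((pre ++ [x]) ++ rest).length : Int) := by
      intro x; simp
    have hcast : ∀ (x : Option Int), ((pre.length : Nat) : Int) + 1 = (((pre ++ [x]).length : Nat) : Int) := by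
      intro x; push_cast; simp
    cases v with
    | none =>
      have hstep : pinsStep2 (w, sc, pre ++ none :: rest) ((pre.length : Nat) : Int)
          = (w, sc, pre ++ none :: rest) := by
        simp [pinsStep2, hread]
      rw [hstep, hlen2 none, hcast none,
          show pre ++ none :: rest = (pre ++ [none]) ++ rest from by simp,
          ih (pre ++ [none]) sc w]
      rw [show greedy (none :: rest) sc = greedy rest sc from rfl]
    | some g =>
      by_cases hm : some g ∈ sc
      · obtain ⟨j, hj⟩ := Option.isSome_iff_exists.mp ((PySem.List.index?_isSome_iff sc (some g)).mpr hm)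
        have hj' : List.idxOf? (some g) sc = some j := by simpa using hj
        have hset : (pre ++ some g :: rest).set ((pre.length : Int)).toNat none = (pre ++ [none]) ++ rest := by
          simp [List.set_append]
        have hstep : pinsStep2 (w, sc, pre ++ some g :: rest) ((pre.length : Nat) : Int)
            = (w + 1, sc.set j none, (pre ++ [none]) ++ rest) := by
          simp [pinsStep2, hread, hm, hj', hset]
        rw [hstep, hlen2 none, hcast none, ih (pre ++ [none]) (sc.set j none) (w + 1)]
        rw [show greedy (some g :: rest) sc = 1 + greedy rest (sc.set j none) from by
          simp [greedy, hm, hj']]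
        ring
      · have hstep : pinsStep2 (w, sc, pre ++ some g :: rest) ((pre.length : Nat) : Int)
            = (w, sc, pre ++ some g :: rest) := by
          simp [pinsStep2, hread, hm]
        rw [hstep, hlen2 (some g), hcast (some g),
            show pre ++ some g :: rest = (pre ++ [some g]) ++ rest from by simp,
            ih (pre ++ [some g]) sc w]
        rw [show greedy (some g :: rest) sc = greedy rest sc from by simp [greedy, hm]]

lemma filterMap_mask (l : List (Int × Int)) (f : Int × Int → Int) :
    (l.map fun p => if p.1 = p.2 then none else some (f p)).filterMap id
      = (l.filter fun p => !decide (p.1 = p.2)).map f := by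
  induction l with
  | nil => simp
  | cons a l ih =>
    by_cases h : a.1 = a.2
    · rw [List.map_cons, if_pos h,
          show ∀ t : List (Option Int), List.filterMap id (none :: t) = List.filterMap id t from
            fun t => rfl,
          ih, List.filter_cons_of_neg (by simp [h])]
    · rw [List.map_cons, if_neg h,
          show ∀ (x : Int) (t : List (Option Int)),
              List.filterMap id (some x :: t) = x :: List.filterMap id t from fun x t => rfl,
          ih, List.filter_cons_of_pos (by simp [h]), List.map_cons]

lemma filterMap_set_none (sc : List (Option Int)) (g : Int) (j : Nat)
    (h : PySem.List.index? sc (some g) = some j) :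
    (sc.set j none).filterMap id = (sc.filterMap id).erase g := by
  obtain ⟨pre, suf, rfl, rfl, hnm⟩ := (PySem.List.index?_eq_some_iff sc (some g) j).mp h
  have hnm2 : g ∉ pre.filterMap id := by
    intro hmem
    obtain ⟨a, ha, hid⟩ := List.mem_filterMap.mp hmem
    exact hnm (by rwa [show a = some g from hid] at ha)
  rw [show (pre ++ some g :: suf).set pre.length none = pre ++ none :: suf from by
        simp [List.set_append],
      List.filterMap_append, List.filterMap_append,
      show List.filterMap id (none :: suf) = List.filterMap id suf from rfl,
      show List.filterMap id (some g :: suf) = g :: List.filterMap id suf from rfl,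
      List.erase_append_right _ hnm2, List.erase_cons_head]

lemma greedy_eq_card :
    ∀ (post sc : List (Option Int)),
    greedy post sc = (((post.filterMap id : List Int) : Multiset Int) ∩ ((sc.filterMap id : List Int) : Multiset Int)).card := by
  intro post
  induction post with
  | nil => intro sc; simp [greedy]
  | cons v rest ih =>
    intro sc
    cases v with
    | none =>
      rw [show greedy (none :: rest) sc = greedy rest sc from rfl, ih sc,
          show List.filterMap id (none :: rest) = List.filterMap id rest from rfl]
    | some g =>
      have hfm : List.filterMap id (some g :: rest) = g :: List.filterMap id rest := rfl
      by_cases hm : some g ∈ sc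
      · obtain ⟨j, hj⟩ := Option.isSome_iff_exists.mp ((PySem.List.index?_isSome_iff sc (some g)).mpr hm)
        have hj' : List.idxOf? (some g) sc = some j := by simpa using hj
        have hg : g ∈ ((sc.filterMap id : List Int) : Multiset Int) := by
          rw [Multiset.mem_coe, List.mem_filterMap]
          exact ⟨some g, hm, rfl⟩
        rw [show greedy (some g :: rest) sc = 1 + greedy rest (sc.set j none) from by
              simp [greedy, hm, hj'],
            ih (sc.set j none), filterMap_set_none sc g j hj, ← Multiset.coe_erase, hfm,
            ← Multiset.cons_coe, Multiset.cons_inter_of_pos _ hg, Multiset.card_cons]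
        push_cast; ring
      · have hg : g ∉ ((sc.filterMap id : List Int) : Multiset Int) := by
          rw [Multiset.mem_coe, List.mem_filterMap]
          rintro ⟨a, ha, hid⟩
          exact hm (by rwa [show a = some g from hid] at ha)
        rw [show greedy (some g :: rest) sc = greedy rest sc from by simp [greedy, hm],
            ih sc, hfm, ← Multiset.cons_coe, Multiset.cons_inter_of_neg _ hg]

lemma card_inter_eq_sum (G S : List Int) :
    ((((G : Multiset Int) ∩ (S : Multiset Int)).card : Nat) : Int)
      = ((PySem.Set.ofList G).map fun g => min ((G.count g : Int)) ((S.count g : Int))).sum := by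
  have hsub : (((G : Multiset Int)) ∩ (S : Multiset Int)).toFinset ⊆ (G : Multiset Int).toFinset := by
    intro a ha
    rw [Multiset.mem_toFinset] at *
    exact (Multiset.mem_inter.mp ha).1
  have h1 : (((G : Multiset Int)) ∩ (S : Multiset Int)).card
      = ∑ a ∈ (G : Multiset Int).toFinset, min (G.count a) (S.count a) := by
    rw [← Multiset.toFinset_sum_count_eq (((G : Multiset Int)) ∩ (S : Multiset Int)),
        Finset.sum_subset hsub]
    · exact Finset.sum_congr rfl fun a _ => by
        rw [Multiset.count_inter, Multiset.coe_count, Multiset.coe_count]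
    · intro a _ ha
      rw [Multiset.count_eq_zero]
      rwa [Multiset.mem_toFinset] at ha
  have h2 : (G : Multiset Int).toFinset = (PySem.Set.ofList G).toFinset := by
    apply Finset.ext
    intro a
    rw [List.mem_toFinset, Multiset.mem_toFinset, Multiset.mem_coe, PySem.Set.mem_ofList]
  rw [h1, h2, ← List.sum_toFinset _ (PySem.Set.nodup_ofList G)]
  push_cast
  exact Finset.sum_congr rfl fun a _ => by push_cast; rfl

lemma foldl_altStep :
    ∀ (l : List (Int × Int)) (b : Int) (rs rg : PySem.Dict Int Int),
    l.foldl altStep (b, rs, rg)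
      = (b + (l.countP (fun p => decide (p.1 = p.2)) : Int),
         ((l.filter fun p => !decide (p.1 = p.2)).map (fun p => p.1)).foldl insStep rs,
         ((l.filter fun p => !decide (p.1 = p.2)).map (fun p => p.2)).foldl insStep rg) := by
  intro l
  induction l with
  | nil => intro b rs rg; simp
  | cons p l ih =>
    intro b rs rg
    by_cases h : p.1 = p.2
    · rw [List.foldl_cons, show altStep (b, rs, rg) p = (b + 1, rs, rg) from by simp [altStep, h],
          ih (b + 1) rs rg]
      simp [List.countP_cons, List.filter_cons, h]
      push_cast; ring
    · rw [List.foldl_cons,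
          show altStep (b, rs, rg) p
            = (b, rs.insert p.1 (rs.getD p.1 0 + 1), rg.insert p.2 (rg.getD p.2 0 + 1)) from by
              simp [altStep, h],
          ih b _ _]
      simp [List.countP_cons, List.filter_cons, h, insStep]

-- ===== VERDICT (by name: the statement is the Claim_ definition above) =====
theorem calculate_pins_spec : Claim_equal_calculate_pins := by
  intro sol gu _ hpre
  have hle : gu.length ≤ sol.length := hpre
  have hzlen : (sol.zip gu).length = gu.length := by rw [List.length_zip]; omega
  have hMG : maskG sol gu gu.length
      = (sol.zip gu).map fun p => if p.1 = p.2 then none else some p.2 := by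
    rw [maskG, List.take_of_length_le (le_of_eq hzlen), List.drop_length]
    simp
  have hMF : maskF sol gu gu.length
      = ((sol.zip gu).map fun p => if p.1 = p.2 then none else some p.1)
        ++ (sol.drop gu.length).map some := by
    rw [maskF, List.take_of_length_le (le_of_eq hzlen)]
  have hMGlen : ((maskG sol gu gu.length).length : Int) = (gu.length : Int) := by
    rw [hMG]; simp [hzlen]
  -- canonical lists
  set Gl := ((sol.zip gu).filter fun p => !decide (p.1 = p.2)).map (fun p => p.2) with hGl
  set Sl := (((sol.zip gu).filter fun p => !decide (p.1 = p.2)).map (fun p => p.1))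
      ++ sol.drop gu.length with hSl
  have hfmG : (maskG sol gu gu.length).filterMap id = Gl := by
    rw [hMG, filterMap_mask]
  have hfmF : (maskF sol gu gu.length).filterMap id = Sl := by
    rw [hMF, List.filterMap_append, filterMap_mask]
    simp [hSl]
  -- A side
  have e1 : (PySem.List.pyRange 0 (gu.length : Int) 1).foldl (pinsStep1 sol gu)
        (0, sol.map some, gu.map some)
      = (0 + (((sol.zip gu).countP fun p => decide (p.1 = p.2) : Nat) : Int),
         maskF sol gu gu.length, maskG sol gu gu.length) := by
    have h := foldl_pinsStep1 sol gu hle gu.length 0 (by omega) 0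
    rw [maskF_zero, maskG_zero] at h
    simpa using h
  have e2 : ((PySem.List.pyRange 0 (gu.length : Int) 1).foldl pinsStep2
        (0, maskF sol gu gu.length, maskG sol gu gu.length)).1
      = 0 + greedy (maskG sol gu gu.length) (maskF sol gu gu.length) := by
    have h := foldl_pinsStep2 (maskG sol gu gu.length) [] (maskF sol gu gu.length) 0
    simp only [List.nil_append, List.length_nil, Nat.cast_zero] at h
    rwa [hMGlen] at h
  have hwhite : greedy (maskG sol gu gu.length) (maskF sol gu gu.length)
      = ((PySem.Set.ofList Gl).map fun g => min ((Gl.count g : Int)) ((Sl.count g : Int))).sum := by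
    rw [greedy_eq_card, hfmG, hfmF, ← card_inter_eq_sum Gl Sl]
  have hA : calculate_pins sol gu
      = [(((sol.zip gu).countP fun p => decide (p.1 = p.2) : Nat) : Int),
         ((PySem.Set.ofList Gl).map fun g => min ((Gl.count g : Int)) ((Sl.count g : Int))).sum] := by
    unfold calculate_pins
    rw [e1]
    simp only []
    rw [e2, hwhite]
    simp
  -- B side
  have hc : ∀ (l : List Int) (d : PySem.Dict Int Int),
      l.foldl insStep d = l.foldl (fun d x => d.insert x (d.getD x 0 + 1)) d := fun l d => rfl
  have hB : calculate_pins_alt sol gu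
      = [(((sol.zip gu).countP fun p => decide (p.1 = p.2) : Nat) : Int),
         ((PySem.Set.ofList Gl).map fun g => min ((Gl.count g : Int)) ((Sl.count g : Int))).sum] := by
    unfold calculate_pins_alt
    rw [foldl_altStep, PySem.List.slice_from_natCast]
    simp only []
    simp only [hc]
    rw [← List.foldl_append, PySem.Dict.foldl_insert_getD_add_one_eq_counter,
        PySem.Dict.foldl_insert_getD_add_one_eq_counter, ← hGl, ← hSl,
        PySem.Dict.items_counter, List.map_map]
    simp [Function.comp_def, PySem.Dict.getD_counter]
  unfold Spec_calculate_pins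
  rw [hA, hB]
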